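-- pv_equiv track=rewrite | github.com/p2achAI/adr-agent | scripts/adr2_agent_action.py | resolve_related
-- ===== SOURCE A (Python) =====
-- from typing import Any, Dict, List, Tuple
--
-- def resolve_related(suggestions: List[str], catalog: List[Dict]) -> List[str]:
--     resolved: List[str] = []
--     for suggestion in suggestions or []:
--         target = suggestion.lower()
--         for item in catalog:
--             title = str(item.get("title", "")).lower()
--             if target and target in title:
--                 resolved.append(item["id"])
--                 break
--     # preserve order, remove duplicates
--     seen = set()
--     unique = []
--     for rid in resolved:
--         if rid not in seen:
--             seen.add(rid)
--             unique.append(rid)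
--     return unique
-- ===== SOURCE B (Python) =====
-- def resolve_related(suggestions, catalog):
--     # Inverted traversal: one pass over the CATALOG (outer), tracking which
--     # suggestions are still unresolved; a suggestion resolves to the earliest
--     # catalog item whose lowered title contains it.  Early exit when nothing
--     # is pending; final dedup via dict.fromkeys.
--     suggs = list(suggestions or [])
--     res = [None] * len(suggs)
--     pending = {i: s.lower() for i, s in enumerate(suggs) if s.lower()}
--     for item in catalog:
--         if not pending:
--             break
--         title = str(item.get("title", "")).lower()
--         done = [i for i, t in pending.items() if t in title]
--         for i in done:
--             res[i] = item["id"]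
--             del pending[i]
--     return list(dict.fromkeys(r for r in res if r is not None))
-- ===== Notes on version B (the rewrite author's own statement) =====
-- stated objective: faster
-- what changed: B inverts the loop nesting: a single pass over the catalog resolves a shrinking pending set of lowered suggestions into an index-addressed result array (early exit once nothing is pending, each title lowered once), then dedups via dict.fromkeys, instead of A's suggestion-outer nested scan over the whole catalog followed by a separate seen-set dedup loop.
-- outside the precondition, e.g. on resolve_related(['a'], [{'title': 'a', 'id': 'x'}, {'title': 'a'}]): A returns ['x'], B returns ['x']
import Mathlib
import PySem

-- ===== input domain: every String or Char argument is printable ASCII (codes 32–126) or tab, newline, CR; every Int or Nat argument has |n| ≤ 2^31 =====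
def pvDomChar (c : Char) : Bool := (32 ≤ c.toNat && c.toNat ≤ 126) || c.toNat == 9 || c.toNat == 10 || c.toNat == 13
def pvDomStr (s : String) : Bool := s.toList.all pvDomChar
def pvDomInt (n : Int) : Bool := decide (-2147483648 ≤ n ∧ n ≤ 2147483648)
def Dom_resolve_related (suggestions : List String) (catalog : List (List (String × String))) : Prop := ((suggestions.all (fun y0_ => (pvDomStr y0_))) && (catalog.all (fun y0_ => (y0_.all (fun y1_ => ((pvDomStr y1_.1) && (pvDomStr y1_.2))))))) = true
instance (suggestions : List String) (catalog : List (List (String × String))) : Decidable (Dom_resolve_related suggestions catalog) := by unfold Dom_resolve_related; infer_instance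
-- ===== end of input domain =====

-- B inverts the traversal: one pass over the catalog resolving a shrinking pending set of suggestions, then a dict.fromkeys dedup (measured faster in a timing run; return value only).

-- ===== PORT A =====
-- inner 'for item in catalog: … break' of A: first item whose lowered title contains target
def pvFindMatchA (target : String) : List (List (String × String)) → Option (List (String × String))
  | [] => none
  | item :: rest =>
    let title := PySem.Str.lower (PySem.Dict.getD (PySem.Dict.mk item) "title" "")
    if target ≠ "" ∧ PySem.Str.isIn target title = true then some item
    else pvFindMatchA target rest

def resolve_related (suggestions : List String) (catalog : List (List (String × String))) : List String :=
  let resolved : List String := suggestions.foldl (fun acc suggestion =>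
    let target := PySem.Str.lower suggestion
    match pvFindMatchA target catalog with
    | some item =>
      match PySem.Dict.get? (PySem.Dict.mk item) "id" with
      | some rid => acc ++ [rid]
      | none => acc        -- Python raises KeyError here; excluded by Pre_
    | none => acc) []
  -- second loop: preserve order, remove duplicates
  (resolved.foldl (fun (st : PySem.Set String × List String) rid =>
      if PySem.Set.contains st.1 rid = false then (PySem.Set.add st.1 rid, st.2 ++ [rid]) else st)
    (PySem.Set.empty, [])).2

-- ===== PORT B =====
-- B's pending dict: {i: s.lower() for i, s in enumerate(suggs) if s.lower()}
def pvPendingB : List String → Nat → List (Nat × String)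
  | [], _ => []
  | s :: rest, i =>
    let t := PySem.Str.lower s
    (if t ≠ "" then [(i, t)] else []) ++ pvPendingB rest (i + 1)

-- one catalog item of B's outer loop: resolve every pending suggestion it matches
def pvStepB (st : List (Option String) × List (Nat × String)) (item : List (String × String)) :
    List (Option String) × List (Nat × String) :=
  if st.2.isEmpty then st         -- 'if not pending: break'
  else
    let title := PySem.Str.lower (PySem.Dict.getD (PySem.Dict.mk item) "title" "")
    let done := st.2.filter (fun p => PySem.Str.isIn p.2 title)
    let pending' := st.2.filter (fun p => !(PySem.Str.isIn p.2 title))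
    match PySem.Dict.get? (PySem.Dict.mk item) "id" with
    | some rid => (done.foldl (fun r p => r.set p.1 (some rid)) st.1, pending')
    | none => (st.1, pending')    -- Python raises KeyError here (when done ≠ []); excluded by Pre_

def resolve_related_alt (suggestions : List String) (catalog : List (List (String × String))) : List String :=
  let res0 : List (Option String) := List.replicate suggestions.length none
  let pending0 := pvPendingB suggestions 0
  let fin := catalog.foldl pvStepB (res0, pending0)
  PySem.List.dedup (fin.1.filterMap id)   -- list(dict.fromkeys(r for r in res if r is not None))

-- ===== PRECONDITION & SPEC =====
-- Pre_ excludes inputs where some catalog item whose lowered title contains a nonempty lowered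
-- suggestion lacks an "id" key: there Python A (and B) raises KeyError (the condition is slightly
-- conservative: it also excludes such an id-less matching item shadowed by an earlier match,
-- on which A and B both still return the same value).
def Pre_resolve_related (suggestions : List String) (catalog : List (List (String × String))) : Prop :=
  ∀ item ∈ catalog,
    (∃ s ∈ suggestions, s ≠ "" ∧
      PySem.Str.isIn (PySem.Str.lower s)
        (PySem.Str.lower (PySem.Dict.getD (PySem.Dict.mk item) "title" "")) = true) →
    PySem.Dict.contains (PySem.Dict.mk item) "id" = true
instance (suggestions : List String) (catalog : List (List (String × String))) : Decidable (Pre_resolve_related suggestions catalog) := by unfold Pre_resolve_related; infer_instance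

def pvWitness_resolve_related : List String × (List (List (String × String))) :=
  (["adr"], [[("title", "ADR notes"), ("id", "A1")]])

def Spec_resolve_related (suggestions : List String) (catalog : List (List (String × String))) (out : List String) : Prop := out = resolve_related_alt suggestions catalog
instance (suggestions : List String) (catalog : List (List (String × String))) (out : List String) : Decidable (Spec_resolve_related suggestions catalog out) := by unfold Spec_resolve_related; infer_instance

-- ===== CLAIM (what is proved, stated in full; the proofs are below) =====
def Claim_equal_resolve_related : Prop := ∀ (suggestions : List String) (catalog : List (List (String × String))), Dom_resolve_related suggestions catalog → Pre_resolve_related suggestions catalog → Spec_resolve_related suggestions catalog (resolve_related suggestions catalog)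

-- ===== LEMMAS AND PROOFS =====

-- the value both programs resolve one suggestion to
def pvR (catalog : List (List (String × String))) (s : String) : Option String :=
  (pvFindMatchA (PySem.Str.lower s) catalog).bind (fun item => PySem.Dict.get? (PySem.Dict.mk item) "id")

-- A's first loop collects exactly the per-suggestion resolutions
theorem pvA_fold (catalog : List (List (String × String))) :
    ∀ (l : List String) (acc : List String),
      l.foldl (fun acc suggestion =>
        let target := PySem.Str.lower suggestion
        match pvFindMatchA target catalog with
        | some item =>
          match PySem.Dict.get? (PySem.Dict.mk item) "id" with
          | some rid => acc ++ [rid]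
          | none => acc
        | none => acc) acc = acc ++ l.filterMap (pvR catalog) := by
  intro l
  induction l with
  | nil => simp
  | cons s rest ih =>
    intro acc
    simp only [List.foldl, List.filterMap_cons]
    cases hf : pvFindMatchA (PySem.Str.lower s) catalog with
    | none => simp [pvR, hf, ih]
    | some item =>
      cases hg : PySem.Dict.get? (PySem.Dict.mk item) "id" with
      | none => simp [pvR, hf, hg, ih]
      | some rid => simp [pvR, hf, hg, ih]

-- A's dedup loop: the seen-set and the output list stay equal, so the output is Set.ofList = dedup
theorem pvA_dedup (l : List String) (s : PySem.Set String) :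
    l.foldl (fun (st : PySem.Set String × List String) rid =>
        if PySem.Set.contains st.1 rid = false then (PySem.Set.add st.1 rid, st.2 ++ [rid]) else st)
      (s, s) = (l.foldl PySem.Set.add s, l.foldl PySem.Set.add s) := by
  induction l generalizing s with
  | nil => rfl
  | cons r rest ih =>
    simp only [List.foldl]
    have h1 : (if PySem.Set.contains s r = false then (PySem.Set.add s r, (s : List String) ++ [r]) else (s, s)) = (PySem.Set.add s r, PySem.Set.add s r) := by
      by_cases hm : r ∈ s
      · simp [hm, PySem.Set.add_of_mem hm]
      · simp [hm, PySem.Set.add_of_not_mem hm]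
    show List.foldl _ (if PySem.Set.contains s r = false then (PySem.Set.add s r, (s : List String) ++ [r]) else (s, s)) rest = _
    rw [h1]
    exact ih _

theorem pvA_dedup' (l : List String) :
    (l.foldl (fun (st : PySem.Set String × List String) rid =>
        if PySem.Set.contains st.1 rid = false then (PySem.Set.add st.1 rid, st.2 ++ [rid]) else st)
      (PySem.Set.empty, ([] : List String))).2 = PySem.Set.ofList l := by
  rw [PySem.Set.ofList_eq_foldl]
  exact congrArg Prod.snd (pvA_dedup l PySem.Set.empty)

-- ===== scan lemmas for B =====

-- pvFindB t catalog: first matching item's id lookup (B looks at nonempty targets only)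
def pvFindB (t : String) : List (List (String × String)) → Option (Option String)
  | [] => none
  | item :: rest =>
    if PySem.Str.isIn t (PySem.Str.lower (PySem.Dict.getD (PySem.Dict.mk item) "title" "")) then
      some (PySem.Dict.get? (PySem.Dict.mk item) "id")
    else pvFindB t rest

theorem pvStepB_nil (catalog : List (List (String × String))) (res : List (Option String)) :
    catalog.foldl pvStepB (res, []) = (res, []) := by
  induction catalog with
  | nil => rfl
  | cons item rest ih => simpa [pvStepB] using ih

theorem pvSetFold_length (done : List (Nat × String)) (res : List (Option String)) (v : Option String) :
    (done.foldl (fun r p => r.set p.1 v) res).length = res.length := by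
  induction done generalizing res with
  | nil => rfl
  | cons p rest ih => simp [List.foldl, ih]

theorem pvScan_length (catalog : List (List (String × String))) :
    ∀ (res : List (Option String)) (pend : List (Nat × String)),
      (catalog.foldl pvStepB (res, pend)).1.length = res.length := by
  induction catalog with
  | nil => intro res pend; rfl
  | cons item rest ih =>
    intro res pend
    simp only [List.foldl]
    by_cases hp : pend.isEmpty
    · simp [pvStepB, hp, ih]
    · have hp' : pend.isEmpty = false := by simpa using hp
      simp only [pvStepB, hp', Bool.false_eq_true, if_false]
      cases hg : PySem.Dict.get? (PySem.Dict.mk item) "id" with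
      | some rid => simp [hg, ih, pvSetFold_length]
      | none => simp [hg, ih]

theorem pvSetFold_get (done : List (Nat × String)) (res : List (Option String)) (v : Option String)
    (j : Nat) :
    (done.foldl (fun r p => r.set p.1 v) res)[j]? =
      if j ∈ done.map (·.1) then (if j < res.length then some v else none) else res[j]? := by
  induction done generalizing res with
  | nil => simp
  | cons p rest ih =>
    simp only [List.foldl, List.map_cons, List.mem_cons]
    rw [ih]
    simp only [List.length_set, List.getElem?_set]
    by_cases h1 : j ∈ rest.map (·.1) <;> by_cases h2 : j = p.1 <;>
      simp [h1, h2, eq_comm] <;> split_ifs <;> simp_all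

theorem pvKeyEq {l : List (Nat × String)} (hnd : (l.map (·.1)).Nodup)
    {p q : Nat × String} (hp : p ∈ l) (hq : q ∈ l) (h : p.1 = q.1) : p = q := by
  induction l with
  | nil => cases hp
  | cons x t ih =>
    simp only [List.map_cons, List.nodup_cons] at hnd
    rcases List.mem_cons.mp hp with rfl | hp' <;> rcases List.mem_cons.mp hq with rfl | hq'
    · rfl
    · exact absurd (h ▸ (List.mem_map_of_mem hq' (f := (·.1)))) hnd.1
    · exact absurd (h.symm ▸ (List.mem_map_of_mem hp' (f := (·.1)))) hnd.1
    · exact ih hnd.2 hp' hq'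

theorem pvFind?_of_mem {l : List (Nat × String)} (hnd : (l.map (·.1)).Nodup)
    {q : Nat × String} (hq : q ∈ l) {j : Nat} (hj : q.1 = j) :
    l.find? (fun p => p.1 == j) = some q := by
  induction l with
  | nil => cases hq
  | cons x t ih =>
    simp only [List.map_cons, List.nodup_cons] at hnd
    rcases List.mem_cons.mp hq with rfl | hq'
    · simp [List.find?, hj]
    · have hx : x.1 ≠ j := by
        intro hxj
        exact hnd.1 (by rw [hxj, ← hj]; exact List.mem_map_of_mem hq' (f := (·.1)))
      have hb : (x.1 == j) = false := by simpa using hx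
      simp only [List.find?, hb]
      exact ih hnd.2 hq'

theorem pvFilterKeysNodup {l : List (Nat × String)} (hnd : (l.map (·.1)).Nodup)
    (f : Nat × String → Bool) : ((l.filter f).map (·.1)).Nodup :=
  ((l.filter_sublist (p := f)).map (·.1)).nodup hnd

theorem pvPendingB_bound : ∀ (l : List String) (i : Nat) (p : Nat × String),
    p ∈ pvPendingB l i → i ≤ p.1 ∧ p.1 < i + l.length := by
  intro l
  induction l with
  | nil => intro i p h; cases h
  | cons s rest ih =>
    intro i p h
    simp only [pvPendingB, List.mem_append] at h
    rcases h with h | h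
    · split_ifs at h with ht
      · simp only [List.mem_singleton] at h
        subst h
        simp only [List.length_cons]
        omega
      · cases h
    · have := ih (i + 1) p h
      simp only [List.length_cons]
      omega

theorem pvPendingB_nodup : ∀ (l : List String) (i : Nat),
    ((pvPendingB l i).map (·.1)).Nodup := by
  intro l
  induction l with
  | nil => intro i; simp [pvPendingB]
  | cons s rest ih =>
    intro i
    simp only [pvPendingB]
    split_ifs with ht
    · simp only [List.cons_append, List.nil_append, List.map_cons, List.nodup_cons]
      refine ⟨fun hm => ?_, ih (i + 1)⟩
      rcases List.mem_map.mp hm with ⟨p, hpm, hpj⟩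
      have := (pvPendingB_bound rest (i + 1) p hpm).1
      omega
    · simpa using ih (i + 1)

theorem pvPendingB_find? : ∀ (l : List String) (i j : Nat) (hj : j < l.length),
    (pvPendingB l i).find? (fun p => p.1 == i + j) =
      (if PySem.Str.lower (l[j]'hj) ≠ "" then some (i + j, PySem.Str.lower (l[j]'hj)) else none) := by
  intro l
  induction l with
  | nil => intro i j hj; cases hj
  | cons s rest ih =>
    intro i j hj
    cases j with
    | zero =>
      simp only [pvPendingB, List.getElem_cons_zero, Nat.add_zero]
      split_ifs with ht
      · simp [List.find?]
      · -- key i is absent: all keys are ≥ i + 1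
        simp only [List.nil_append]
        rw [List.find?_eq_none]
        intro p hm hpj
        have := (pvPendingB_bound rest (i + 1) p hm).1
        have : p.1 = i := by simpa using hpj
        omega
    | succ j' =>
      have hj' : j' < rest.length := by simpa using hj
      simp only [pvPendingB, List.getElem_cons_succ]
      have hkey : (i + (j' + 1)) = (i + 1) + j' := by omega
      rw [hkey]
      by_cases ht : PySem.Str.lower s ≠ ""
      · simp only [if_pos ht, List.cons_append, List.nil_append, List.find?]
        have hne : (i == i + 1 + j') = false := by
          simp only [beq_eq_false_iff_ne, ne_eq]
          omega
        rw [hne]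
        dsimp only
        exact ih (i + 1) j' hj'
      · rw [if_neg ht, List.nil_append]
        exact ih (i + 1) j' hj'

-- main scan characterisation
theorem pvScan_get (catalog : List (List (String × String))) :
    ∀ (res : List (Option String)) (pend : List (Nat × String)),
      (pend.map (·.1)).Nodup → (∀ p ∈ pend, p.1 < res.length) →
      ∀ j : Nat,
        (catalog.foldl pvStepB (res, pend)).1[j]? =
          match pend.find? (fun p => p.1 == j) with
          | some p =>
            match pvFindB p.2 catalog with
            | some (some rid) => if j < res.length then some (some rid) else none
            | _ => res[j]?
          | none => res[j]? := by
  induction catalog with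
  | nil =>
    intro res pend hnd hlt j
    cases hf : pend.find? (fun p => p.1 == j) with
    | none => rfl
    | some q => simp [pvFindB]
  | cons item rest ih =>
    intro res pend hnd hlt j
    by_cases hp : pend = []
    · subst hp
      have h0 : pvStepB (res, []) item = (res, []) := rfl
      simp only [List.foldl, h0, pvStepB_nil]
      rfl
    · have hp' : pend.isEmpty = false := by simpa [List.isEmpty_iff] using hp
      set title := PySem.Str.lower (PySem.Dict.getD (PySem.Dict.mk item) "title" "") with htitle
      set done := pend.filter (fun p => PySem.Str.isIn p.2 title) with hdone
      set pending' := pend.filter (fun p => !(PySem.Str.isIn p.2 title)) with hpend'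
      have hndP : (pending'.map (·.1)).Nodup := pvFilterKeysNodup hnd _
      -- find? facts
      have key_none : pend.find? (fun p => p.1 == j) = none →
          pending'.find? (fun p => p.1 == j) = none := by
        intro hf
        rw [List.find?_eq_none] at hf ⊢
        exact fun p hm => hf p (List.mem_of_mem_filter hm)
      have key_not_done : pend.find? (fun p => p.1 == j) = none → j ∉ done.map (·.1) := by
        intro hf hmem
        rw [List.find?_eq_none] at hf
        rcases List.mem_map.mp hmem with ⟨p, hpm, hpj⟩
        exact hf p (List.mem_of_mem_filter hpm) (by simpa using hpj)
      cases hg : PySem.Dict.get? (PySem.Dict.mk item) "id" with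
      | some rid =>
        have hstep : pvStepB (res, pend) item =
            (done.foldl (fun r p => r.set p.1 (some rid)) res, pending') := by
          simp only [pvStepB, hp', Bool.false_eq_true, if_false, hg, ← htitle, ← hdone, ← hpend']
        have hltP : ∀ p ∈ pending',
            p.1 < (done.foldl (fun r p => r.set p.1 (some rid)) res).length := by
          intro p hm
          rw [pvSetFold_length]
          exact hlt p (List.mem_of_mem_filter hm)
        simp only [List.foldl, hstep]
        rw [ih _ _ hndP hltP j]
        cases hf : pend.find? (fun p => p.1 == j) with
        | none =>
          rw [key_none hf, pvSetFold_get, if_neg (key_not_done hf)]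
        | some q =>
          have hqm : q ∈ pend := List.mem_of_find?_eq_some hf
          have hqj : q.1 = j := by simpa using List.find?_some hf
          have hjlt : j < res.length := hqj ▸ hlt q hqm
          by_cases hm : PySem.Str.isIn q.2 title
          · -- q is resolved by this item
            have hqd : q ∈ done := List.mem_filter.mpr ⟨hqm, by simpa using hm⟩
            have hfp : pending'.find? (fun p => p.1 == j) = none := by
              rw [List.find?_eq_none]
              intro p hpm hpj
              have : p = q := pvKeyEq hnd (List.mem_of_mem_filter hpm) hqm
                (by rw [hqj]; simpa using hpj)
              subst this
              have hb := (List.mem_filter.mp hpm).2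
              rw [Bool.not_eq_true'] at hb
              rw [hb] at hm
              cases hm
            rw [hfp, pvSetFold_get,
              if_pos (List.mem_map.mpr ⟨q, hqd, hqj⟩), if_pos hjlt]
            simp only [pvFindB, ← htitle, hm, if_true, hg, hjlt, if_pos]
          · -- q stays pending
            have hqp : q ∈ pending' := List.mem_filter.mpr ⟨hqm, by simpa using hm⟩
            have hfp : pending'.find? (fun p => p.1 == j) = some q := pvFind?_of_mem hndP hqp hqj
            have hnd2 : j ∉ done.map (·.1) := by
              intro hmem
              rcases List.mem_map.mp hmem with ⟨p, hpm, hpj⟩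
              have : p = q := pvKeyEq hnd (List.mem_of_mem_filter hpm) hqm (by rw [hqj]; exact hpj)
              subst this
              exact hm (List.mem_filter.mp hpm).2
            rw [hfp, pvSetFold_get, if_neg hnd2]
            simp only [pvSetFold_length]
            have hm' : PySem.Str.isIn q.2 title = false := by
              cases h : PySem.Str.isIn q.2 title
              · rfl
              · exact absurd h hm
            have hfB : pvFindB q.2 (item :: rest) = pvFindB q.2 rest := by
              simp only [pvFindB, ← htitle, hm', Bool.false_eq_true, if_false]
            rw [hfB]
      | none =>
        have hstep : pvStepB (res, pend) item = (res, pending') := by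
          simp only [pvStepB, hp', Bool.false_eq_true, if_false, hg, ← htitle, ← hpend']
        have hltP : ∀ p ∈ pending', p.1 < res.length :=
          fun p hm => hlt p (List.mem_of_mem_filter hm)
        simp only [List.foldl, hstep]
        rw [ih _ _ hndP hltP j]
        cases hf : pend.find? (fun p => p.1 == j) with
        | none => rw [key_none hf]
        | some q =>
          have hqm : q ∈ pend := List.mem_of_find?_eq_some hf
          have hqj : q.1 = j := by simpa using List.find?_some hf
          by_cases hm : PySem.Str.isIn q.2 title
          · have hfp : pending'.find? (fun p => p.1 == j) = none := by
              rw [List.find?_eq_none]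
              intro p hpm hpj
              have : p = q := pvKeyEq hnd (List.mem_of_mem_filter hpm) hqm
                (by rw [hqj]; simpa using hpj)
              subst this
              have hb := (List.mem_filter.mp hpm).2
              rw [Bool.not_eq_true'] at hb
              rw [hb] at hm
              cases hm
            rw [hfp]
            simp only [pvFindB, ← htitle, hm, if_true, hg]
          · have hqp : q ∈ pending' := List.mem_filter.mpr ⟨hqm, by simpa using hm⟩
            have hfp : pending'.find? (fun p => p.1 == j) = some q := pvFind?_of_mem hndP hqp hqj
            rw [hfp]
            have hm' : PySem.Str.isIn q.2 title = false := by
              cases h : PySem.Str.isIn q.2 title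
              · rfl
              · exact absurd h hm
            have hfB : pvFindB q.2 (item :: rest) = pvFindB q.2 rest := by
              simp only [pvFindB, ← htitle, hm', Bool.false_eq_true, if_false]
            dsimp only
            rw [hfB]



theorem pvFindMatchA_empty (c : List (List (String × String))) : pvFindMatchA "" c = none := by
  induction c with
  | nil => rfl
  | cons item rest ih => simp [pvFindMatchA, ih]

theorem pvFindB_eq {t : String} (ht : t ≠ "") (c : List (List (String × String))) :
    pvFindB t c = (pvFindMatchA t c).map (fun item => PySem.Dict.get? (PySem.Dict.mk item) "id") := by
  induction c with
  | nil => rfl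
  | cons item rest ih =>
    simp only [pvFindB, pvFindMatchA]
    by_cases hm : PySem.Str.isIn t (PySem.Str.lower (PySem.Dict.getD (PySem.Dict.mk item) "title" ""))
    · rw [if_pos hm, if_pos ⟨ht, hm⟩]
      rfl
    · have hm' : PySem.Str.isIn t (PySem.Str.lower (PySem.Dict.getD (PySem.Dict.mk item) "title" "")) = false := by
        cases h : PySem.Str.isIn t (PySem.Str.lower (PySem.Dict.getD (PySem.Dict.mk item) "title" ""))
        · rfl
        · exact absurd h hm
      rw [if_neg (by rw [hm']; exact Bool.false_ne_true), if_neg (by rw [hm']; simp)]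
      exact ih

theorem pvFin_eq (suggestions : List String) (catalog : List (List (String × String))) :
    (catalog.foldl pvStepB (List.replicate suggestions.length none, pvPendingB suggestions 0)).1
      = suggestions.map (pvR catalog) := by
  have hnd := pvPendingB_nodup suggestions 0
  have hlt : ∀ p ∈ pvPendingB suggestions 0,
      p.1 < (List.replicate suggestions.length (none : Option String)).length := by
    intro p hm
    have := (pvPendingB_bound suggestions 0 p hm).2
    simpa using this
  apply List.ext_getElem?
  intro j
  by_cases hj : j < suggestions.length
  · rw [pvScan_get catalog _ _ hnd hlt j]
    have hfind := pvPendingB_find? suggestions 0 j hj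
    simp only [Nat.zero_add] at hfind
    rw [hfind]
    have hrep : (List.replicate suggestions.length (none : Option String))[j]? = some none := by
      simp [List.getElem?_replicate, hj]
    have hmap : (suggestions.map (pvR catalog))[j]? = some (pvR catalog (suggestions[j]'hj)) := by
      simp [List.getElem?_map, List.getElem?_eq_getElem hj]
    rw [hmap]
    by_cases ht : PySem.Str.lower (suggestions[j]'hj) ≠ ""
    · rw [if_pos ht]
      dsimp only
      rw [pvFindB_eq ht]
      unfold pvR
      cases hf : pvFindMatchA (PySem.Str.lower (suggestions[j]'hj)) catalog with
      | none => simpa [hf] using hrep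
      | some item =>
        cases hg : PySem.Dict.get? (PySem.Dict.mk item) "id" with
        | none => simpa [hf, hg] using hrep
        | some rid => simp [hf, hg, List.length_replicate, hj]
    · rw [if_neg ht]
      have ht' : PySem.Str.lower (suggestions[j]'hj) = "" := by
        by_contra h
        exact ht h
      unfold pvR
      rw [ht', pvFindMatchA_empty]
      simpa using hrep
  · have h1 : (catalog.foldl pvStepB (List.replicate suggestions.length none, pvPendingB suggestions 0)).1.length = suggestions.length := by
      rw [pvScan_length]
      simp
    have e1 : (catalog.foldl pvStepB (List.replicate suggestions.length none, pvPendingB suggestions 0)).1[j]? = none :=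
      List.getElem?_eq_none (by rw [h1]; omega)
    have e2 : (suggestions.map (pvR catalog))[j]? = none :=
      List.getElem?_eq_none (by rw [List.length_map]; omega)
    rw [e1, e2]

-- ===== VERDICT (by name: the statement is the Claim_ definition above) =====
theorem resolve_related_spec : Claim_equal_resolve_related := by
  intro suggestions catalog _ _
  show resolve_related suggestions catalog = resolve_related_alt suggestions catalog
  have hA : resolve_related suggestions catalog
      = PySem.Set.ofList (suggestions.filterMap (pvR catalog)) := by
    unfold resolve_related
    rw [pvA_fold, List.nil_append]
    exact pvA_dedup' _
  have hB : resolve_related_alt suggestions catalog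
      = PySem.List.dedup (suggestions.filterMap (pvR catalog)) := by
    show PySem.List.dedup (((catalog.foldl pvStepB (List.replicate suggestions.length none,
      pvPendingB suggestions 0)).1).filterMap id) = _
    rw [pvFin_eq, List.filterMap_map]
    rfl
  rw [hA, hB, PySem.List.dedup_eq_ofList]
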